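-- pv_equiv track=rewrite | github.com/fderyckel/ifitwala_ed | ifitwala_ed/assessment/doctype/task_feedback_thread/task_feedback_thread.py | _unique_index_exists
-- ===== SOURCE A (Python) =====
-- def _unique_index_exists(rows, columns):
--     index_map = {}
--     for row in rows:
--         key_name = row.get("Key_name")
--         if not key_name:
--             continue
--         try:
--             non_unique = int(row.get("Non_unique") or 1)
--         except Exception:
--             non_unique = 1
--         if non_unique != 0:
--             continue
--         index_map.setdefault(key_name, []).append(row)
--
--     for entries in index_map.values():
--         ordered = sorted(entries, key=lambda row: int(row.get("Seq_in_index") or 0))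
--         if [row.get("Column_name") for row in ordered] == columns:
--             return True
--     return False
-- ===== SOURCE B (Python) =====
-- from itertools import groupby
--
--
-- def _unique_index_exists(rows, columns):
--     cands = []
--     for row in rows:
--         key_name = row.get("Key_name")
--         if not key_name:
--             continue
--         try:
--             non_unique = int(row.get("Non_unique") or 1)
--         except Exception:
--             non_unique = 1
--         if non_unique != 0:
--             continue
--         cands.append((key_name, int(row.get("Seq_in_index") or 0), row.get("Column_name")))
--     cands.sort(key=lambda t: (t[0], t[1]))
--     for _, grp in groupby(cands, key=lambda t: t[0]):
--         if [col for _, _, col in grp] == columns: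
--             return True
--     return False
-- ===== Notes on version B (the rewrite author's own statement) =====
-- stated objective: idiomatic
-- what changed: Replaces the dict-of-lists grouping plus a separate stable sort per group with one pass collecting (key, seq, column) triples, a single global stable sort on (key, seq), and a streaming itertools.groupby comparison per consecutive key run.
import Mathlib
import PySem

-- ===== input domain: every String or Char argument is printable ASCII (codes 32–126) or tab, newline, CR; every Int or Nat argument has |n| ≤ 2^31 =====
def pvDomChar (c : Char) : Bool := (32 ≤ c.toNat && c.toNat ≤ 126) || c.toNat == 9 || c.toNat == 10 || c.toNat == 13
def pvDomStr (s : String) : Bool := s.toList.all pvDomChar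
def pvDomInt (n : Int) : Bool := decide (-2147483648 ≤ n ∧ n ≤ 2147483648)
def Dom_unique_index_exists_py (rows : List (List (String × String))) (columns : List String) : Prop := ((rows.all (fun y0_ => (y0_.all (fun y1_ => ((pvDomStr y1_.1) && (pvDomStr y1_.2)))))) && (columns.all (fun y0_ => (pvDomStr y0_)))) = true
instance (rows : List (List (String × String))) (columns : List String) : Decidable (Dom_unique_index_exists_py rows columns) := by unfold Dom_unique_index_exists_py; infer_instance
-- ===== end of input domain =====

-- B replaces A's dict-of-lists grouping + per-group sort with one global stable sort on
-- (key, seq) and a streaming groupby over consecutive key runs (idiomatic; same cost).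

-- ===== PORT A =====
-- row.get(k): first-match association-list lookup (Python dict under the List (K × V) convention)
def pvRget (row : List (String × String)) (key : String) : Option String :=
  (PySem.Dict.mk row).get? key

-- int(row.get("Non_unique") or 1) with the try/except fallback to 1
def pvNonUnique (row : List (String × String)) : Int :=
  match pvRget row "Non_unique" with
  | none => 1
  | some s => if s = "" then 1 else (PySem.Int.ofStr? s).getD 1

-- int(row.get("Seq_in_index") or 0); Python RAISES ValueError when the string is non-empty and
-- unparsable — the `.getD 0` arm is unreachable under Pre_unique_index_exists_py
def pvSeq (row : List (String × String)) : Int :=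
  match pvRget row "Seq_in_index" with
  | none => 0
  | some s => if s = "" then 0 else (PySem.Int.ofStr? s).getD 0

def unique_index_exists_py (rows : List (List (String × String))) (columns : List String) : Bool :=
  let index_map : PySem.Dict String (List (List (String × String))) :=
    rows.foldl (fun d row =>
      match pvRget row "Key_name" with
      | none => d
      | some k =>
        if k = "" then d
        else if pvNonUnique row ≠ 0 then d
        else d.modify k [] (fun l => l ++ [row])) PySem.Dict.empty
  index_map.values.any (fun entries =>
    decide (((PySem.List.sorted entries (fun r => pvSeq r) false).map
              (fun r => pvRget r "Column_name")) = columns.map some))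

-- ===== PORT B =====
-- itertools.groupby(cands, key=t[0]) on the already-sorted list: consecutive runs of equal keys
def pvGroupby : List (String × Int × Option String) → List (List (String × Int × Option String))
  | [] => []
  | x :: xs =>
    (x :: xs.takeWhile (fun y => y.1 == x.1)) ::
      pvGroupby (xs.dropWhile (fun y => y.1 == x.1))
termination_by l => l.length
decreasing_by
  exact Nat.lt_succ_of_le (List.length_dropWhile_le _ _)

def unique_index_exists_py_alt (rows : List (List (String × String))) (columns : List String) : Bool :=
  let cands : List (String × Int × Option String) :=
    rows.foldl (fun acc row =>
      match pvRget row "Key_name" with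
      | none => acc
      | some k =>
        if k = "" then acc
        else if pvNonUnique row ≠ 0 then acc
        else acc ++ [(k, pvSeq row, pvRget row "Column_name")]) []
  let sortedCands := PySem.List.sorted2 cands (fun t => t.1) (fun t => t.2.1) false
  (pvGroupby sortedCands).any (fun g =>
    decide ((g.map (fun t => t.2.2)) = columns.map some))

-- ===== PRECONDITION & SPEC =====
def pvSeqParses (row : List (String × String)) : Bool :=
  match pvRget row "Seq_in_index" with
  | none => true
  | some s => s == "" || (PySem.Int.ofStr? s).isSome

-- Pre_ excludes exactly the inputs where Python raises ValueError: a row of a unique index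
-- (non-empty Key_name, Non_unique parsing to 0) whose Seq_in_index is a non-empty string
-- int() cannot parse.  (B raises there too.)
def Pre_unique_index_exists_py (rows : List (List (String × String))) (columns : List String) : Prop :=
  ∀ row ∈ rows,
    ((pvRget row "Key_name").getD "" ≠ "" ∧ pvNonUnique row = 0) → pvSeqParses row = true
instance (rows : List (List (String × String))) (columns : List String) : Decidable (Pre_unique_index_exists_py rows columns) := by
  unfold Pre_unique_index_exists_py; infer_instance

def pvWitness_unique_index_exists_py : (List (List (String × String))) × List String :=
  ([[("Key_name", "i"), ("Non_unique", "0"), ("Seq_in_index", "2"), ("Column_name", "b")],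
    [("Key_name", "i"), ("Non_unique", "0"), ("Seq_in_index", "1"), ("Column_name", "a")]],
   ["a", "b"])

def Spec_unique_index_exists_py (rows : List (List (String × String))) (columns : List String) (out : Bool) : Prop := out = unique_index_exists_py_alt rows columns
instance (rows : List (List (String × String))) (columns : List String) (out : Bool) : Decidable (Spec_unique_index_exists_py rows columns out) := by unfold Spec_unique_index_exists_py; infer_instance

-- ===== CLAIM (what is proved, stated in full; the proofs are below) =====
def Claim_equal_unique_index_exists_py : Prop := ∀ (rows : List (List (String × String))) (columns : List String), Dom_unique_index_exists_py rows columns → Pre_unique_index_exists_py rows columns → Spec_unique_index_exists_py rows columns (unique_index_exists_py rows columns)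

-- ===== LEMMAS AND PROOFS =====

-- the comparator of B's sort (lexicographic on (key, seq)) and its seq-only restriction
def pvLtT (a b : String × Int × Option String) : Bool :=
  decide (a.1 < b.1) || (!decide (b.1 < a.1) && decide (a.2.1 < b.2.1))

def pvLtS (a b : String × Int × Option String) : Bool :=
  decide (a.2.1 < b.2.1)

-- the shared row-selection predicate of both loops, and the data each loop keeps per row
def pvQual (row : List (String × String)) : Bool :=
  match pvRget row "Key_name" with
  | none => false
  | some k => !(k == "") && (pvNonUnique row == 0)

def pvKeyOf (row : List (String × String)) : String := (pvRget row "Key_name").getD ""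

def pvTrip (row : List (String × String)) : String × Int × Option String :=
  (pvKeyOf row, pvSeq row, pvRget row "Column_name")

lemma pvLtT_iff {a b : String × Int × Option String} :
    pvLtT a b = true ↔ (a.1 < b.1 ∨ (a.1 = b.1 ∧ a.2.1 < b.2.1)) := by
  simp only [pvLtT, Bool.or_eq_true, Bool.and_eq_true, Bool.not_eq_true', decide_eq_true_eq,
    decide_eq_false_iff_not]
  constructor
  · rintro (h | ⟨h1, h2⟩)
    · exact Or.inl h
    · rcases lt_trichotomy a.1 b.1 with h | h | h
      · exact Or.inl h
      · exact Or.inr ⟨h, h2⟩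
      · exact absurd h h1
  · rintro (h | ⟨h1, h2⟩)
    · exact Or.inl h
    · exact Or.inr ⟨by rw [h1]; exact lt_irrefl _, h2⟩

lemma pvLtT_false_iff {a b : String × Int × Option String} :
    pvLtT a b = false ↔ ¬ (a.1 < b.1 ∨ (a.1 = b.1 ∧ a.2.1 < b.2.1)) := by
  rw [← pvLtT_iff, Bool.not_eq_true]

lemma pvLtT_asymm {a b : String × Int × Option String} (h : pvLtT a b = true) : pvLtT b a = false := by
  rw [pvLtT_iff] at h
  rw [pvLtT_false_iff]
  rcases h with h | ⟨h1, h2⟩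
  · rintro (h' | ⟨h1', _⟩)
    · exact absurd (h.trans h') (lt_irrefl _)
    · exact absurd h (h1' ▸ lt_irrefl _)
  · rintro (h' | ⟨_, h2'⟩)
    · exact absurd h' (h1 ▸ lt_irrefl _)
    · exact absurd (h2.trans h2') (lt_irrefl _)

lemma pvLtT_trans {a b c : String × Int × Option String} (h1 : pvLtT a b = true)
    (h2 : pvLtT b c = true) : pvLtT a c = true := by
  rw [pvLtT_iff] at *
  rcases h1 with h1 | ⟨h1, h1'⟩ <;> rcases h2 with h2 | ⟨h2, h2'⟩
  · exact Or.inl (h1.trans h2)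
  · exact Or.inl (h2 ▸ h1)
  · exact Or.inl (h1 ▸ h2)
  · exact Or.inr ⟨h1.trans h2, h1'.trans h2'⟩

lemma pvLtT_cross {x y z : String × Int × Option String} (h1 : pvLtT x y = true)
    (h2 : pvLtT z y = false) (hk : x.1 = z.1) : pvLtS x z = true := by
  rw [pvLtT_iff] at h1
  rw [pvLtT_false_iff] at h2
  push Not at h2
  simp only [pvLtS, decide_eq_true_eq]
  rcases h1 with h1 | ⟨h1, h1'⟩
  · exact absurd (hk ▸ h1) h2.1
  · exact h1'.trans_le (h2.2 (hk ▸ h1))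

lemma pvLtT_eq_ltS_of_eq_key {a b : String × Int × Option String} (h : a.1 = b.1) :
    pvLtT a b = pvLtS a b := by
  simp [pvLtT, pvLtS, h]

lemma pvLtT_irrefl (a : String × Int × Option String) : pvLtT a a = false := by
  simp [pvLtT]

lemma insertBy_cons_pos {α : Type} {before : α → α → Bool} {x y : α} {ys : List α}
    (h : before x y = true) :
    PySem.List.insertBy before x (y :: ys) = x :: y :: ys := by
  simp [PySem.List.insertBy, h]

lemma insertBy_cons_neg {α : Type} {before : α → α → Bool} {x y : α} {ys : List α}
    (h : before x y = false) :
    PySem.List.insertBy before x (y :: ys) = y :: PySem.List.insertBy before x ys := by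
  simp [PySem.List.insertBy, h]

lemma pairwise_insertBy (x : String × Int × Option String) (acc : List (String × Int × Option String))
    (h : acc.Pairwise (fun a b => pvLtT b a = false)) :
    (PySem.List.insertBy pvLtT x acc).Pairwise (fun a b => pvLtT b a = false) := by
  induction acc with
  | nil => simp [PySem.List.insertBy]
  | cons y ys ih =>
    rw [List.pairwise_cons] at h
    by_cases hxy : pvLtT x y = true
    · rw [insertBy_cons_pos hxy]
      refine List.pairwise_cons.mpr ⟨?_, List.pairwise_cons.mpr h⟩
      intro z hz
      rcases List.mem_cons.mp hz with rfl | hz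
      · exact pvLtT_asymm hxy
      · by_contra hc
        rw [Bool.not_eq_false] at hc
        exact absurd (pvLtT_trans hc hxy) (by rw [h.1 z hz]; simp)
    · rw [Bool.not_eq_true] at hxy
      rw [insertBy_cons_neg hxy]
      refine List.pairwise_cons.mpr ⟨?_, ih h.2⟩
      intro z hz
      rcases (PySem.List.mem_insertBy _ _ _ _).mp hz with rfl | hz
      · exact hxy
      · exact h.1 z hz

lemma pairwise_foldl_insertBy (l : List (String × Int × Option String)) :
    ∀ acc, acc.Pairwise (fun a b => pvLtT b a = false) →
      (l.foldl (fun acc x => PySem.List.insertBy pvLtT x acc) acc).Pairwise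
        (fun a b => pvLtT b a = false) := by
  induction l with
  | nil => intro acc h; exact h
  | cons x l ih =>
    intro acc h
    exact ih _ (pairwise_insertBy x acc h)

lemma filter_insertBy (k : String) (x : String × Int × Option String)
    (acc : List (String × Int × Option String))
    (h : acc.Pairwise (fun a b => pvLtT b a = false)) :
    (PySem.List.insertBy pvLtT x acc).filter (fun t => t.1 == k)
      = if x.1 == k then PySem.List.insertBy pvLtS x (acc.filter (fun t => t.1 == k))
        else acc.filter (fun t => t.1 == k) := by
  induction acc with
  | nil =>
    by_cases hx : (x.1 == k) = true <;> simp [PySem.List.insertBy, List.filter, hx]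
  | cons y ys ih =>
    rw [List.pairwise_cons] at h
    by_cases hxy : pvLtT x y = true
    · rw [insertBy_cons_pos hxy]
      by_cases hx : (x.1 == k) = true
      · have hxk : x.1 = k := by simpa using hx
        rw [if_pos hx, List.filter_cons, if_pos hx]
        rcases hf : (y :: ys).filter (fun t => t.1 == k) with _ | ⟨z, rest⟩
        · rw [hf]; simp [PySem.List.insertBy]
        · have hzmem : z ∈ (y :: ys).filter (fun t => t.1 == k) := by
            rw [hf]; exact List.mem_cons_self
          have hzk : z.1 = k := by simpa using List.of_mem_filter hzmem
          have hzy : pvLtT z y = false := by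
            rcases List.mem_cons.mp (List.mem_of_mem_filter hzmem) with rfl | hz
            · exact pvLtT_irrefl _
            · exact h.1 z hz
          have hs : pvLtS x z = true := pvLtT_cross hxy hzy (hxk.trans hzk.symm)
          rw [hf, insertBy_cons_pos hs, ← hf]
      · rw [if_neg hx, List.filter_cons, if_neg hx]
    · rw [Bool.not_eq_true] at hxy
      rw [insertBy_cons_neg hxy, List.filter_cons, List.filter_cons]
      by_cases hy : (y.1 == k) = true
      · rw [if_pos hy, if_pos hy, ih h.2]
        by_cases hx : (x.1 == k) = true
        · rw [if_pos hx, if_pos hx]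
          have hxsy : pvLtS x y = false := by
            rw [← pvLtT_eq_ltS_of_eq_key
              (by rw [(by simpa using hx : x.1 = k), (by simpa using hy : y.1 = k)])]
            exact hxy
          rw [insertBy_cons_neg hxsy]
        · rw [if_neg hx, if_neg hx]
      · rw [if_neg hy, if_neg hy, ih h.2]

lemma filter_foldl_insertBy (k : String) :
    ∀ (l acc : List (String × Int × Option String)),
      acc.Pairwise (fun a b => pvLtT b a = false) →
      (l.foldl (fun acc x => PySem.List.insertBy pvLtT x acc) acc).filter (fun t => t.1 == k)
        = (l.filter (fun t => t.1 == k)).foldl (fun acc x => PySem.List.insertBy pvLtS x acc)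
            (acc.filter (fun t => t.1 == k)) := by
  intro l
  induction l with
  | nil => intro acc h; simp
  | cons x l ih =>
    intro acc h
    rw [List.foldl_cons, ih _ (pairwise_insertBy x acc h), filter_insertBy k x acc h,
      List.filter_cons]
    by_cases hx : (x.1 == k) = true
    · rw [if_pos hx, if_pos hx, List.foldl_cons]
    · rw [if_neg hx, if_neg hx]

lemma insertBy_map {α β : Type} (f : α → β) (bf : β → β → Bool) (bf' : α → α → Bool)
    (hf : ∀ a b, bf (f a) (f b) = bf' a b) (x : α) (acc : List α) :
    PySem.List.insertBy bf (f x) (acc.map f) = (PySem.List.insertBy bf' x acc).map f := by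
  induction acc with
  | nil => simp [PySem.List.insertBy]
  | cons y ys ih =>
    by_cases h : bf' x y = true
    · rw [List.map_cons, insertBy_cons_pos (by rw [hf]; exact h), insertBy_cons_pos h, List.map_cons,
        List.map_cons]
    · rw [Bool.not_eq_true] at h
      rw [List.map_cons, insertBy_cons_neg (by rw [hf]; exact h), insertBy_cons_neg h, List.map_cons,
        ih]

lemma foldl_insertBy_map {α β : Type} (f : α → β) (bf : β → β → Bool) (bf' : α → α → Bool)
    (hf : ∀ a b, bf (f a) (f b) = bf' a b) :
    ∀ (l acc : List α),
      (l.map f).foldl (fun acc x => PySem.List.insertBy bf x acc) (acc.map f)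
        = (l.foldl (fun acc x => PySem.List.insertBy bf' x acc) acc).map f := by
  intro l
  induction l with
  | nil => intro acc; simp
  | cons x l ih =>
    intro acc
    rw [List.map_cons, List.foldl_cons, List.foldl_cons, insertBy_map f bf bf' hf, ih]

lemma filter_eq_takeWhile (k : String) :
    ∀ l : List (String × Int × Option String),
      l.Pairwise (fun a b => a.1 ≤ b.1) → (∀ y ∈ l, k ≤ y.1) →
      l.filter (fun y => y.1 == k) = l.takeWhile (fun y => y.1 == k) := by
  intro l
  induction l with
  | nil => intro _ _; rfl
  | cons y ys ih =>
    intro hp hb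
    rw [List.pairwise_cons] at hp
    by_cases hy : (y.1 == k) = true
    · rw [List.filter_cons, if_pos hy, List.takeWhile_cons, if_pos hy,
        ih hp.2 (fun z hz => hb z (List.mem_cons_of_mem _ hz))]
    · rw [List.filter_cons, if_neg hy, List.takeWhile_cons, if_neg hy]
      rw [List.filter_eq_nil_iff]
      intro z hz
      have h1 : y.1 ≤ z.1 := hp.1 z hz
      have h2 : k < y.1 := lt_of_le_of_ne (hb y List.mem_cons_self) (fun he => hy (by simp [← he]))
      simp only [beq_iff_eq]
      exact fun he => absurd (he ▸ (h2.trans_le h1)) (lt_irrefl _)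

lemma groupby_filter :
    ∀ S : List (String × Int × Option String),
      S.Pairwise (fun a b => a.1 ≤ b.1) →
      ((∀ g ∈ pvGroupby S, ∃ x ∈ S, g = S.filter (fun y => y.1 == x.1)) ∧
       (∀ x ∈ S, S.filter (fun y => y.1 == x.1) ∈ pvGroupby S)) := by
  intro S
  induction S using pvGroupby.induct with
  | case1 => simp [pvGroupby]
  | case2 x xs ih =>
    intro hp
    rw [List.pairwise_cons] at hp
    have hble : ∀ y ∈ xs, x.1 ≤ y.1 := fun y hy => hp.1 y hy
    have htake : xs.filter (fun y => y.1 == x.1) = xs.takeWhile (fun y => y.1 == x.1) :=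
      filter_eq_takeWhile x.1 xs hp.2 hble
    have hfirst : (x :: xs).filter (fun y => y.1 == x.1)
        = x :: xs.takeWhile (fun y => y.1 == x.1) := by
      rw [List.filter_cons, if_pos (by simp), htake]
    set D := xs.dropWhile (fun y => y.1 == x.1) with hD
    have hDsub : List.Sublist D xs := List.dropWhile_sublist _
    have hDp : D.Pairwise (fun a b => a.1 ≤ b.1) := hp.2.sublist hDsub
    have hDne : ∀ z ∈ D, ¬ (z.1 = x.1) := by
      have hsplit : xs.takeWhile (fun y => y.1 == x.1) ++ D = xs :=
        List.takeWhile_append_dropWhile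
      have : xs.filter (fun y => y.1 == x.1)
          = xs.takeWhile (fun y => y.1 == x.1) ++ D.filter (fun y => y.1 == x.1) := by
        conv_lhs => rw [← hsplit]
        rw [List.filter_append, List.filter_eq_self.mpr
          (fun a ha => List.mem_takeWhile_imp (p := fun (y : String × Int × Option String) => y.1 == x.1) ha)]
      rw [htake] at this
      have hnil : D.filter (fun y => y.1 == x.1) = [] := by
        have := congrArg List.length this
        simp only [List.length_append] at this
        have hlen : (D.filter (fun y => y.1 == x.1)).length = 0 := by omega
        exact List.eq_nil_of_length_eq_zero hlen
      rw [List.filter_eq_nil_iff] at hnil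
      intro z hz he
      exact hnil z hz (by simp [he])
    have hlift : ∀ k, ¬ (k = x.1) →
        (x :: xs).filter (fun y => y.1 == k) = D.filter (fun y => y.1 == k) := by
      intro k hk
      have hsplit : xs.takeWhile (fun y => y.1 == x.1) ++ D = xs :=
        List.takeWhile_append_dropWhile
      rw [List.filter_cons, if_neg (by simpa using fun he => hk he.symm), ← hsplit,
        List.filter_append]
      have : (xs.takeWhile (fun y => y.1 == x.1)).filter (fun y => y.1 == k) = [] := by
        rw [List.filter_eq_nil_iff]
        intro z hz
        have := List.mem_takeWhile_imp hz
        simp only [beq_iff_eq] at this ⊢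
        exact fun he => hk (he ▸ this ▸ rfl)
      rw [this, List.nil_append]
    obtain ⟨ih1, ih2⟩ := ih hDp
    constructor
    · intro g hg
      rw [pvGroupby] at hg
      rcases List.mem_cons.mp hg with rfl | hg
      · exact ⟨x, List.mem_cons_self, hfirst.symm⟩
      · obtain ⟨x', hx', hgeq⟩ := ih1 g hg
        refine ⟨x', List.mem_cons_of_mem _ (hDsub.mem hx'), ?_⟩
        rw [hlift x'.1 (hDne x' hx'), hgeq]
    · intro x' hx'
      by_cases hk : x'.1 = x.1
      · rw [hk, hfirst, pvGroupby]
        exact List.mem_cons_self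
      · have hxs : x' ∈ xs := by
          rcases List.mem_cons.mp hx' with rfl | h
          · exact absurd rfl hk
          · exact h
        have hxD : x' ∈ D := by
          rcases List.mem_append.mp (by
            rw [List.takeWhile_append_dropWhile]; exact hxs :
              x' ∈ xs.takeWhile (fun y => y.1 == x.1) ++ D) with h | h
          · exact absurd (by simpa using List.mem_takeWhile_imp h) hk
          · exact h
        rw [hlift x'.1 hk, pvGroupby]
        exact List.mem_cons_of_mem _ (ih2 x' hxD)

-- A's grouping loop, rewritten as a fold over the filtered rows paired with their keys
lemma foldA_eq :
    ∀ (l : List (List (String × String))) (d : PySem.Dict String (List (List (String × String)))),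
      l.foldl (fun d row =>
          match pvRget row "Key_name" with
          | none => d
          | some k =>
            if k = "" then d
            else if pvNonUnique row ≠ 0 then d
            else d.modify k [] (fun l => l ++ [row])) d
        = ((l.filter pvQual).map (fun r => (pvKeyOf r, r))).foldl
            (fun d p => d.modify p.1 [] (fun l => l ++ [p.2])) d := by
  intro l
  induction l with
  | nil => intro d; rfl
  | cons r l ih =>
    intro d
    rw [List.foldl_cons, List.filter_cons]
    rcases hr : pvRget r "Key_name" with _ | k
    · have hq : pvQual r = false := by simp [pvQual, hr]
      rw [hq, if_neg (by simp), ih]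
    · by_cases hk : k = ""
      · have hq : pvQual r = false := by simp [pvQual, hr, hk]
        rw [hq, if_neg (by simp)]
        simp only [hk, if_pos]
        rw [ih]
      · by_cases hnu : pvNonUnique r = 0
        · have hq : pvQual r = true := by simp [pvQual, hr, hk, hnu]
          rw [hq, if_pos (by simp)]
          simp only [hk, hnu]
          rw [List.map_cons, List.foldl_cons, ih]
          have : pvKeyOf r = k := by simp [pvKeyOf, hr]
          rw [this]
          simp
        · have hq : pvQual r = false := by simp [pvQual, hr, hk, hnu]
          rw [hq, if_neg (by simp)]
          simp only []
          rw [if_neg hk, if_pos hnu, ih]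

-- B's collection loop, rewritten as the filtered rows mapped to their triples
lemma foldB_eq :
    ∀ (l : List (List (String × String))) (acc : List (String × Int × Option String)),
      l.foldl (fun acc row =>
          match pvRget row "Key_name" with
          | none => acc
          | some k =>
            if k = "" then acc
            else if pvNonUnique row ≠ 0 then acc
            else acc ++ [(k, pvSeq row, pvRget row "Column_name")]) acc
        = acc ++ (l.filter pvQual).map pvTrip := by
  intro l
  induction l with
  | nil => intro acc; simp
  | cons r l ih =>
    intro acc
    rw [List.foldl_cons, List.filter_cons]
    rcases hr : pvRget r "Key_name" with _ | k
    · have hq : pvQual r = false := by simp [pvQual, hr]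
      rw [hq, if_neg (by simp), ih]
    · by_cases hk : k = ""
      · have hq : pvQual r = false := by simp [pvQual, hr, hk]
        rw [hq, if_neg (by simp)]
        simp only [hk, if_pos]
        rw [ih]
      · by_cases hnu : pvNonUnique r = 0
        · have hq : pvQual r = true := by simp [pvQual, hr, hk, hnu]
          rw [hq, if_pos (by simp)]
          simp only [hk, hnu]
          rw [List.map_cons, ih]
          have : pvTrip r = (k, pvSeq r, pvRget r "Column_name") := by simp [pvTrip, pvKeyOf, hr]
          rw [this]
          simp
        · have hq : pvQual r = false := by simp [pvQual, hr, hk, hnu]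
          rw [hq, if_neg (by simp)]
          simp only []
          rw [if_neg hk, if_pos hnu, ih]

-- A as an `any` over the distinct keys of the qualifying rows
lemma A_char (rows : List (List (String × String))) (columns : List String) :
    unique_index_exists_py rows columns
      = (PySem.Set.ofList ((rows.filter pvQual).map pvKeyOf)).any (fun k =>
          decide (((PySem.List.sorted ((rows.filter pvQual).filter (fun r => pvKeyOf r == k))
                      (fun r => pvSeq r) false).map (fun r => pvRget r "Column_name"))
            = columns.map some)) := by
  simp only [unique_index_exists_py]
  rw [foldA_eq]
  set P := rows.filter pvQual with hP
  set pairs := P.map (fun r => (pvKeyOf r, r)) with hpairs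
  set d := pairs.foldl (fun d p => d.modify p.1 [] (fun l => l ++ [p.2])) PySem.Dict.empty with hd
  have hkeys : d.keys = PySem.Set.ofList (P.map pvKeyOf) := by
    have h := PySem.Dict.keys_foldl_modify_key pairs Prod.fst ([] : List (List (String × String)))
      (fun d p => fun l => l ++ [p.2]) PySem.Dict.empty
    simp only [PySem.Dict.keys_empty] at h
    rw [hd, h, PySem.Set.update_nil_left, hpairs, List.map_map]
    rfl
  have hnd : d.keys.Nodup := by
    rw [hd]
    exact PySem.Dict.nodup_keys_foldl_modify_key pairs Prod.fst _ _ PySem.Dict.empty (by simp)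
  have hgetD : ∀ k, d.getD k [] = P.filter (fun r => pvKeyOf r == k) := by
    intro k
    rw [hd, PySem.Dict.getD_foldl_modify_append pairs PySem.Dict.empty k]
    rw [PySem.Dict.getD_empty, List.nil_append, hpairs, List.filter_map, List.map_map]
    have h1 : ((fun (p : String × List (String × String)) => p.1 == k) ∘
        (fun r => (pvKeyOf r, r))) = fun r => pvKeyOf r == k := rfl
    rw [h1]
    have h2 : ((fun (p : String × List (String × String)) => p.2) ∘
        (fun r => (pvKeyOf r, r))) = id := rfl
    rw [h2, List.map_id]
  rw [PySem.Dict.values_eq_map_keys d hnd [], List.any_map]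
  rw [hkeys]
  refine PySem.List.any_congr_mem ?_
  intro k _
  simp only [Function.comp_apply]
  rw [hgetD k]

-- B with its loop and sort named
lemma B_char (rows : List (List (String × String))) (columns : List String) :
    unique_index_exists_py_alt rows columns
      = (pvGroupby (PySem.List.sorted2 ((rows.filter pvQual).map pvTrip)
            (fun t => t.1) (fun t => t.2.1) false)).any (fun g =>
          decide ((g.map (fun t => t.2.2)) = columns.map some)) := by
  simp only [unique_index_exists_py_alt]
  rw [foldB_eq]
  rfl

-- ===== VERDICT (by name: the statement is the Claim_ definition above) =====
theorem unique_index_exists_py_spec : Claim_equal_unique_index_exists_py := by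
  intro rows columns _ _
  unfold Spec_unique_index_exists_py
  rw [A_char, B_char]
  set P := rows.filter pvQual with hP
  set cands := P.map pvTrip with hcands
  set S := PySem.List.sorted2 cands (fun t => t.1) (fun t => t.2.1) false with hS
  have hSfold : S = cands.foldl (fun acc x => PySem.List.insertBy pvLtT x acc) [] := rfl
  have hpairT : S.Pairwise (fun a b => pvLtT b a = false) := by
    rw [hSfold]
    exact pairwise_foldl_insertBy cands [] (by simp)
  have hpair : S.Pairwise (fun a b => a.1 ≤ b.1) := by
    refine hpairT.imp ?_
    intro a b h
    rw [pvLtT_false_iff] at h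
    exact le_of_not_gt (fun hlt => h (Or.inl hlt))
  have hperm : S.Perm cands := PySem.List.sorted2_perm cands _ _ _
  -- the group at key k is A's per-key sorted entries, mapped to triples
  have hkey : ∀ k : String, S.filter (fun t => t.1 == k)
      = (PySem.List.sorted (P.filter (fun r => pvKeyOf r == k)) (fun r => pvSeq r) false).map pvTrip := by
    intro k
    rw [hSfold, filter_foldl_insertBy k cands [] (by simp), List.filter_nil]
    rw [hcands, List.filter_map]
    have h1 : ((fun (t : String × Int × Option String) => t.1 == k) ∘ pvTrip)
        = fun r => pvKeyOf r == k := rfl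
    rw [h1]
    have h2 := foldl_insertBy_map pvTrip pvLtS (fun a b => decide (pvSeq a < pvSeq b))
      (fun a b => rfl) (P.filter (fun r => pvKeyOf r == k)) []
    simp only [List.map_nil] at h2
    rw [h2, ← PySem.List.sorted_eq_foldl_insertBy]
  have hchk : ∀ k : String,
      ((S.filter (fun t => t.1 == k)).map (fun t => t.2.2) = columns.map some)
        ↔ ((PySem.List.sorted (P.filter (fun r => pvKeyOf r == k)) (fun r => pvSeq r) false).map
              (fun r => pvRget r "Column_name") = columns.map some) := by
    intro k
    rw [hkey k, List.map_map]
    rfl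
  obtain ⟨hg1, hg2⟩ := groupby_filter S hpair
  rw [Bool.eq_iff_iff]
  simp only [List.any_eq_true, decide_eq_true_eq]
  constructor
  · intro ⟨k, hk, hQ⟩
    rw [PySem.Set.mem_ofList] at hk
    obtain ⟨r, hr, hrk⟩ := List.mem_map.mp hk
    have hxc : pvTrip r ∈ cands := by rw [hcands]; exact List.mem_map_of_mem hr
    have hxS : pvTrip r ∈ S := hperm.mem_iff.mpr hxc
    refine ⟨S.filter (fun y => y.1 == (pvTrip r).1), hg2 _ hxS, ?_⟩
    have hk1 : (pvTrip r).1 = k := hrk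
    rw [hk1]
    exact (hchk k).mpr hQ
  · intro ⟨g, hg, hc⟩
    obtain ⟨x, hxS, rfl⟩ := hg1 g hg
    have hxc : x ∈ cands := hperm.mem_iff.mp hxS
    rw [hcands] at hxc
    obtain ⟨r, hr, rfl⟩ := List.mem_map.mp hxc
    refine ⟨(pvTrip r).1, ?_, (hchk _).mp hc⟩
    rw [PySem.Set.mem_ofList]
    exact List.mem_map_of_mem hr
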